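-- pv_equiv track=rewrite | github.com/miliar/Code_Jam_Webscraper | Solutions_python/Problem_56/40.py | solve
-- ===== SOURCE A (Python) =====
-- def solve(data, N, K):
-- 	for i in range(N):
-- 		data[i] = data[i].replace('.','')
-- 		data[i] = "."*(N-len(data[i]))+data[i]
-- 	red = False
-- 	blue = False
-- 	redS = "R" * K
-- 	blueS= "B" * K
--
-- 	for i in range(N):
-- 		for j in range(N-K+1):
-- 			s = ""
-- 			for k in range(K):
-- 				s += data[i][j+k]
-- 			if s == redS: red = True
-- 			if s == blueS: blue = True
-- 	for i in range(N-K+1):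
-- 		for j in range(N):
-- 			s = ""
-- 			for k in range(K):
-- 				s += data[i+k][j]
-- 			if s == redS: red = True
-- 			if s == blueS: blue = True
-- 	for i in range(K-1,N):
-- 		for j in range(N-K+1):
-- 			s = ""
-- 			for k in range(K):
-- 				s += data[i-k][j+k]
-- 			if s == redS: red = True
-- 			if s == blueS: blue = True
-- 	for i in range(N-K+1):
-- 		for j in range(N-K+1):
-- 			s = ""
-- 			for k in range(K):
-- 				s += data[i+k][j+k]
-- 			if s == redS: red = True
-- 			if s == blueS: blue = True
-- 	if red and blue: return "Both"
-- 	if red: return "Red"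
-- 	if blue: return "Blue"
-- 	return "Neither"
-- ===== SOURCE B (Python) =====
-- def solve(data, N, K):
--     if K > N:
--         # a run of K cannot fit on an N x N board
--         return "Neither"
--     rows = []
--     for i in range(N):
--         r = data[i].replace('.', '')
--         rows.append(('.' * (N - len(r)) + r)[:N])
--     lines = list(rows)
--     lines += [''.join(rows[i][j] for i in range(N)) for j in range(N)]
--     lines += [''.join(rows[i][i + d] for i in range(max(0, -d), min(N, N - d)))
--               for d in range(-(N - 1), N)]
--     lines += [''.join(rows[r][t - r] for r in range(max(0, t - N + 1), min(t, N - 1) + 1))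
--               for t in range(2 * N - 1)]
--     redS, blueS = 'R' * K, 'B' * K
--     red = any(redS in ln for ln in lines)
--     blue = any(blueS in ln for ln in lines)
--     if red and blue:
--         return "Both"
--     if red:
--         return "Red"
--     if blue:
--         return "Blue"
--     return "Neither"
-- ===== Notes on version B (the rewrite author's own statement) =====
-- stated objective: faster
-- what changed: B materializes every row, column, diagonal and anti-diagonal of the padded board as a string once and tests 'R'*K / 'B'*K with the substring operator, instead of A's four nested loops that rebuild a K-character window string for each of the ~4*N^2 start positions; intended as faster (a timing run read B faster at every size both finished, but could not confirm it at sizes where both time out).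
-- intended difference: On degenerate inputs with N <= 0 and K <= N (no board, run length not exceeding it) A returns 'Both' because its empty target string matches the empty window of loops that still iterate, while B returns 'Neither', the intended answer for a board with no cells. — e.g. on solve([], 0, 0): A returns "Both", B returns "Neither"
import Mathlib
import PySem

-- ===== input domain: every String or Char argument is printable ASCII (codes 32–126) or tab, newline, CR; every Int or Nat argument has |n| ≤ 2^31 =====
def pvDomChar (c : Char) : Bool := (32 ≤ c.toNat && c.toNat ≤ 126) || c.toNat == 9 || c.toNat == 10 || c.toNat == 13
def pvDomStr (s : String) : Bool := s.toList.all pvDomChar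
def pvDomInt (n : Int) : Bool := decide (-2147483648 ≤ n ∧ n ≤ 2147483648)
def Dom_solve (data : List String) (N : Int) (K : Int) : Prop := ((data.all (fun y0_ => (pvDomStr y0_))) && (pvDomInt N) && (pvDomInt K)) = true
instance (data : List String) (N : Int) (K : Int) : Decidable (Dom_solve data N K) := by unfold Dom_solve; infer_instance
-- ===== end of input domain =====

-- B materializes each board line once and uses a substring test instead of A's per-position
-- window rebuilding; intended as faster (a timing run read B faster at the sizes both finished). A mutates `data` in place (re-padding each row); the
-- equivalence proved here is about the RETURN value only — B does not mutate its argument.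

-- ===== PORT A =====
def padA (N : Int) (s : List Char) : List Char :=
  let t := PySem.Chars.replace s ['.'] []
  List.replicate (N - (t.length : Int)).toNat '.' ++ t

def gridA (data : List String) (N : Int) : List (List Char) :=
  (PySem.List.pyRange 0 N).foldl
    (fun d i => d.set i.toNat (padA N (PySem.List.pyGetD d i []))) (data.map String.toList)

def winA (grid : List (List Char)) (K : Int) (f : Int → Int × Int) : List Char :=
  (PySem.List.pyRange 0 K).foldl
    (fun s k => s ++ [PySem.List.pyGetD (PySem.List.pyGetD grid (f k).1 []) (f k).2 ' ']) []

def stepA (grid : List (List Char)) (K : Int) (redS blueS : List Char)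
    (f : Int → Int × Int) (rb : Bool × Bool) : Bool × Bool :=
  let s := winA grid K f
  let rb := if s == redS then (true, rb.2) else rb
  if s == blueS then (rb.1, true) else rb

def loopA (grid : List (List Char)) (K : Int) (redS blueS : List Char)
    (iR jR : List Int) (f : Int → Int → Int → Int × Int) (rb : Bool × Bool) : Bool × Bool :=
  iR.foldl (fun rb i => jR.foldl (fun rb j => stepA grid K redS blueS (f i j) rb) rb) rb

def solve (data : List String) (N : Int) (K : Int) : String :=
  let grid := gridA data N
  let redS := List.replicate K.toNat 'R'
  let blueS := List.replicate K.toNat 'B'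
  let rb : Bool × Bool := (false, false)
  let rb := loopA grid K redS blueS (PySem.List.pyRange 0 N) (PySem.List.pyRange 0 (N - K + 1))
    (fun i j k => (i, j + k)) rb
  let rb := loopA grid K redS blueS (PySem.List.pyRange 0 (N - K + 1)) (PySem.List.pyRange 0 N)
    (fun i j k => (i + k, j)) rb
  let rb := loopA grid K redS blueS (PySem.List.pyRange (K - 1) N) (PySem.List.pyRange 0 (N - K + 1))
    (fun i j k => (i - k, j + k)) rb
  let rb := loopA grid K redS blueS (PySem.List.pyRange 0 (N - K + 1)) (PySem.List.pyRange 0 (N - K + 1))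
    (fun i j k => (i + k, j + k)) rb
  if rb.1 && rb.2 then "Both"
  else if rb.1 then "Red"
  else if rb.2 then "Blue"
  else "Neither"

-- ===== PORT B =====
-- Source B's row padding is textually the same computation as A's; the shared helper padA is reused.
-- All board indexing in Source B is in range, so pyGetD's defaults are never consulted.
def rowsB (data : List String) (N : Int) : List (List Char) :=
  (PySem.List.pyRange 0 N).foldl
    (fun rs i => rs ++ [PySem.List.slice (padA N (PySem.List.pyGetD (data.map String.toList) i [])) none (some N)]) []

def linesB (data : List String) (N : Int) : List (List Char) :=
  let rows := rowsB data N
  let lines := rows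
  let lines := lines ++ (PySem.List.pyRange 0 N).map (fun j =>
      (PySem.List.pyRange 0 N).map (fun i => PySem.List.pyGetD (PySem.List.pyGetD rows i []) j ' '))
  let lines := lines ++ (PySem.List.pyRange (-(N - 1)) N).map (fun d =>
      (PySem.List.pyRange (max 0 (-d)) (min N (N - d))).map (fun i =>
        PySem.List.pyGetD (PySem.List.pyGetD rows i []) (i + d) ' '))
  let lines := lines ++ (PySem.List.pyRange 0 (2 * N - 1)).map (fun t =>
      (PySem.List.pyRange (max 0 (t - N + 1)) (min t (N - 1) + 1)).map (fun r =>
        PySem.List.pyGetD (PySem.List.pyGetD rows r []) (t - r) ' '))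
  lines

def solve_alt (data : List String) (N : Int) (K : Int) : String :=
  if N < K then "Neither" else
  let lines := linesB data N
  let redS := List.replicate K.toNat 'R'
  let blueS := List.replicate K.toNat 'B'
  let red := lines.any (fun l => PySem.Chars.isIn redS l)
  let blue := lines.any (fun l => PySem.Chars.isIn blueS l)
  if red && blue then "Both"
  else if red then "Red"
  else if blue then "Blue"
  else "Neither"

-- ===== PRECONDITION & SPEC =====
-- Pre_ excludes exactly the inputs where A raises IndexError: N greater than the number of rows.
def Pre_solve (data : List String) (N : Int) (K : Int) : Prop := N ≤ (data.length : Int)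
instance (data : List String) (N : Int) (K : Int) : Decidable (Pre_solve data N K) := by
  unfold Pre_solve; infer_instance

def pvWitness_solve : List String × Int × Int := (["RB", "BR"], 2, 2)

-- On degenerate inputs with N ≤ 0 and K ≤ N (no board, run length not exceeding it) A returns
-- "Both" because its empty target string matches the empty window of loops that still iterate,
-- while B returns "Neither", the intended answer for a board with no cells.
def D_solve (data : List String) (N : Int) (K : Int) : Prop := N ≤ 0 ∧ K ≤ N
instance (data : List String) (N : Int) (K : Int) : Decidable (D_solve data N K) := by
  unfold D_solve; infer_instance

def Spec_solve (data : List String) (N : Int) (K : Int) (out : String) : Prop :=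
  ¬ D_solve data N K → out = solve_alt data N K
instance (data : List String) (N : Int) (K : Int) (out : String) : Decidable (Spec_solve data N K out) := by
  unfold Spec_solve; infer_instance

def pvDiffWitness_solve : List String × Int × Int := ([], 0, 0)
def pvDiffWitnessOut_solve : String × String := ("Both", "Neither")

-- ===== CLAIM (what is proved, stated in full; the proofs are below) =====
def Claim_unchanged_solve : Prop := ∀ (data : List String) (N : Int) (K : Int),
  Dom_solve data N K → Pre_solve data N K → Spec_solve data N K (solve data N K)
def Claim_changed_solve : Prop :=
  Dom_solve (pvDiffWitness_solve.1) (pvDiffWitness_solve.2.1) (pvDiffWitness_solve.2.2) ∧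
  Pre_solve (pvDiffWitness_solve.1) (pvDiffWitness_solve.2.1) (pvDiffWitness_solve.2.2) ∧
  D_solve (pvDiffWitness_solve.1) (pvDiffWitness_solve.2.1) (pvDiffWitness_solve.2.2) ∧
  solve (pvDiffWitness_solve.1) (pvDiffWitness_solve.2.1) (pvDiffWitness_solve.2.2) = pvDiffWitnessOut_solve.1 ∧
  solve_alt (pvDiffWitness_solve.1) (pvDiffWitness_solve.2.1) (pvDiffWitness_solve.2.2) = pvDiffWitnessOut_solve.2 ∧
  pvDiffWitnessOut_solve.1 ≠ pvDiffWitnessOut_solve.2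
def Claim_exact_solve : Prop := ∀ (data : List String) (N : Int) (K : Int),
  Dom_solve data N K → Pre_solve data N K → D_solve data N K → solve data N K ≠ solve_alt data N K

-- ===== LEMMAS AND PROOFS =====

theorem pyRange_nil {a b : Int} (h : b ≤ a) : PySem.List.pyRange a b = [] := by
  rw [PySem.List.pyRange_one]
  have : (b - a).toNat = 0 := by omega
  simp [this]

theorem foldl_const {α β : Type} {v : β} (l : List α) (b : β) (h : l ≠ []) :
    l.foldl (fun _ _ => v) b = v := by
  induction l generalizing b with
  | nil => simp at h
  | cons x xs ih =>
    cases xs with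
    | nil => simp
    | cons y ys => rw [List.foldl_cons]; exact ih v (by simp)

theorem stepA_deg (grid : List (List Char)) (K : Int) (hK : K ≤ 0)
    (f : Int → Int × Int) (rb : Bool × Bool) :
    stepA grid K (List.replicate K.toNat 'R') (List.replicate K.toNat 'B') f rb = (true, true) := by
  have hk0 : K.toNat = 0 := by omega
  have hw : winA grid K f = [] := by
    unfold winA; rw [pyRange_nil hK]; rfl
  unfold stepA
  simp [hw, hk0]

theorem loopA_nil (grid : List (List Char)) (K : Int) (rS bS : List Char)
    (iR jR : List Int) (f : Int → Int → Int → Int × Int) (rb : Bool × Bool) (hi : iR = []) :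
    loopA grid K rS bS iR jR f rb = rb := by
  unfold loopA; rw [hi]; rfl

theorem loopA_id (grid : List (List Char)) (K : Int) (rS bS : List Char)
    (iR jR : List Int) (f : Int → Int → Int → Int × Int) (rb : Bool × Bool) (hj : jR = []) :
    loopA grid K rS bS iR jR f rb = rb := by
  unfold loopA; rw [hj]
  simp only [List.foldl_nil]
  exact List.foldl_fixed _

theorem loopA_deg (grid : List (List Char)) (K : Int) (hK : K ≤ 0)
    (iR jR : List Int) (f : Int → Int → Int → Int × Int) (rb : Bool × Bool)
    (hi : iR ≠ []) (hj : jR ≠ []) :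
    loopA grid K (List.replicate K.toNat 'R') (List.replicate K.toNat 'B') iR jR f rb = (true, true) := by
  unfold loopA
  have hin : ∀ (i : Int) (rb0 : Bool × Bool),
      jR.foldl (fun rb j => stepA grid K (List.replicate K.toNat 'R') (List.replicate K.toNat 'B') (f i j) rb) rb0 = (true, true) := by
    intro i rb0
    rw [PySem.List.foldl_congr_mem jR _ (fun _ _ => ((true : Bool), (true : Bool))) rb0
      (fun acc x _ => stepA_deg grid K hK (f i x) acc)]
    exact foldl_const _ _ hj
  rw [PySem.List.foldl_congr_mem iR _ (fun _ _ => ((true : Bool), (true : Bool))) rb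
    (fun acc i _ => hin i acc)]
  exact foldl_const _ _ hi

theorem solve_deg_D (data : List String) (N K : Int) (hN : N ≤ 0) (hK : K ≤ N) :
    solve data N K = "Both" ∧ solve_alt data N K = "Neither" := by
  have hK0 : K ≤ 0 := by omega
  have h1 : PySem.List.pyRange 0 N = [] := pyRange_nil (by omega)
  have h4 : PySem.List.pyRange (-(N - 1)) N = [] := pyRange_nil (by omega)
  have h5 : PySem.List.pyRange 0 (2 * N - 1) = [] := pyRange_nil (by omega)
  have hjne : PySem.List.pyRange 0 (N - K + 1) ≠ [] := by
    rw [PySem.List.pyRange_one_cons (by omega)]; simp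
  have hine : PySem.List.pyRange (K - 1) N ≠ [] := by
    rw [PySem.List.pyRange_one_cons (by omega)]; simp
  constructor
  · unfold solve
    simp only [loopA_nil _ _ _ _ _ _ _ _ h1, loopA_id _ _ _ _ _ _ _ _ h1,
      loopA_deg _ _ hK0 _ _ _ _ hine hjne, loopA_deg _ _ hK0 _ _ _ _ hjne hjne]
    rfl
  · unfold solve_alt linesB rowsB
    rw [if_neg (by omega : ¬ N < K)]
    simp only [h1, h4, h5]
    simp

theorem solve_deg_neither (data : List String) (N K : Int) (hN : N ≤ 0) (hK : N < K) :
    solve data N K = "Neither" ∧ solve_alt data N K = "Neither" := by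
  have h1 : PySem.List.pyRange 0 N = [] := pyRange_nil (by omega)
  have h2 : PySem.List.pyRange 0 (N - K + 1) = [] := pyRange_nil (by omega)
  have h3 : PySem.List.pyRange (K - 1) N = [] := pyRange_nil (by omega)
  have h4 : PySem.List.pyRange (-(N - 1)) N = [] := pyRange_nil (by omega)
  have h5 : PySem.List.pyRange 0 (2 * N - 1) = [] := pyRange_nil (by omega)
  constructor
  · unfold solve loopA
    simp [h1, h2, h3]
  · unfold solve_alt
    rw [if_pos (by omega : N < K)]

theorem solve_deg_both (data : List String) (N K : Int) (hN : 1 ≤ N) (hK : K ≤ 0)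
    (hlen : N ≤ (data.length : Int)) :
    solve data N K = "Both" ∧ solve_alt data N K = "Both" := by
  have h0N : PySem.List.pyRange 0 N ≠ [] := by
    rw [PySem.List.pyRange_one_cons (by omega)]; simp
  have hjne : PySem.List.pyRange 0 (N - K + 1) ≠ [] := by
    rw [PySem.List.pyRange_one_cons (by omega)]; simp
  have hine : PySem.List.pyRange (K - 1) N ≠ [] := by
    rw [PySem.List.pyRange_one_cons (by omega)]; simp
  constructor
  · unfold solve
    simp only [loopA_deg _ _ hK _ _ _ _ h0N hjne, loopA_deg _ _ hK _ _ _ _ hjne h0N,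
      loopA_deg _ _ hK _ _ _ _ hine hjne, loopA_deg _ _ hK _ _ _ _ hjne hjne]
    rfl
  · have hk0 : K.toNat = 0 := by omega
    obtain ⟨x, xs, hx⟩ : ∃ x xs, PySem.List.pyRange 0 N = x :: xs := by
      cases h : PySem.List.pyRange 0 N with
      | nil => exact absurd h h0N
      | cons a l => exact ⟨a, l, rfl⟩
    unfold solve_alt linesB rowsB
    rw [if_neg (by omega : ¬ N < K)]
    simp only [hx]
    simp [hk0, PySem.Chars.isIn_nil]

-- core infrastructure for the main equivalence
theorem bool_eq_of_iff {a b : Bool} (h : a = true ↔ b = true) : a = b := by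
  cases a <;> cases b <;> simp_all

theorem or_foldl_left {α : Type} (p : α → Bool) (l : List α) (b : Bool) :
    l.foldl (fun r x => p x || r) b = (b || l.any p) := by
  induction l generalizing b with
  | nil => simp
  | cons x xs ih =>
    rw [List.foldl_cons, ih, List.any_cons]
    cases b <;> cases p x <;> simp

theorem or_foldl_right {α : Type} (p : α → Bool) (l : List α) (b : Bool) :
    l.foldl (fun r x => r || p x) b = (b || l.any p) := by
  induction l generalizing b with
  | nil => simp
  | cons x xs ih =>
    rw [List.foldl_cons, ih, List.any_cons]
    cases b <;> cases p x <;> simp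

theorem stepA_prod (grid : List (List Char)) (K : Int) (rS bS : List Char)
    (f : Int → Int × Int) (rb : Bool × Bool) :
    stepA grid K rS bS f rb = ((winA grid K f == rS) || rb.1, (winA grid K f == bS) || rb.2) := by
  unfold stepA
  by_cases h1 : winA grid K f == rS <;> by_cases h2 : winA grid K f == bS <;> simp [h1, h2]

theorem inner_fold_eq {α : Type} (pr pb : α → Bool) (l : List α) (rb : Bool × Bool) :
    l.foldl (fun rb j => (pr j || rb.1, pb j || rb.2)) rb = (rb.1 || l.any pr, rb.2 || l.any pb) := by
  rw [PySem.List.foldl_prod_mk (fun s e => pr e || s) (fun s e => pb e || s) l rb.1 rb.2]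
  rw [or_foldl_left, or_foldl_left]

theorem outer_fold_eq {α : Type} (q1 q2 : α → Bool) (l : List α) (rb : Bool × Bool) :
    l.foldl (fun rb i => (rb.1 || q1 i, rb.2 || q2 i)) rb = (rb.1 || l.any q1, rb.2 || l.any q2) := by
  rw [PySem.List.foldl_prod_mk (fun s e => s || q1 e) (fun s e => s || q2 e) l rb.1 rb.2]
  rw [or_foldl_right, or_foldl_right]

theorem loopA_eq_any (grid : List (List Char)) (K : Int) (rS bS : List Char)
    (iR jR : List Int) (f : Int → Int → Int → Int × Int) (rb : Bool × Bool) :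
    loopA grid K rS bS iR jR f rb =
      (rb.1 || iR.any (fun i => jR.any (fun j => winA grid K (f i j) == rS)),
       rb.2 || iR.any (fun i => jR.any (fun j => winA grid K (f i j) == bS))) := by
  unfold loopA
  simp only [stepA_prod, inner_fold_eq, outer_fold_eq]

-- the padded row both programs work on
def rowOf (data : List String) (N : Int) (i : Int) : List Char :=
  padA N (PySem.List.pyGetD (data.map String.toList) i [])

theorem rowOf_len (data : List String) (N : Int) (i : Int) :
    N.toNat ≤ (rowOf data N i).length := by
  unfold rowOf padA
  simp only [List.length_append, List.length_replicate]
  omega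

theorem rowsB_eq_map (data : List String) (N : Int) (hN0 : 0 ≤ N) :
    rowsB data N = (PySem.List.pyRange 0 N).map
      (fun i => List.take N.toNat (rowOf data N i)) := by
  unfold rowsB
  rw [PySem.List.foldl_append_singleton_eq_map]
  refine List.map_congr_left (fun i _ => ?_)
  rw [PySem.List.slice_to _ hN0]
  rfl

theorem rowsB_get (data : List String) (N : Int) (i : Int) (h0 : 0 ≤ i) (h1 : i < N) :
    PySem.List.pyGetD (rowsB data N) i [] = List.take N.toNat (rowOf data N i) := by
  rw [rowsB_eq_map data N (by omega), PySem.List.pyGetD_of_nonneg _ _ h0]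
  have hN0 : 0 ≤ N := by omega
  rw [show N = ((N.toNat : Int)) from by omega, PySem.List.pyRange_zero_natCast, List.map_map]
  have hi : i.toNat < N.toNat := by omega
  rw [List.getD_eq_getElem?_getD]
  rw [List.getElem?_map]
  rw [List.getElem?_range hi]
  simp [show ((i.toNat : Int)) = i from by omega]

theorem pyGetD_take (l : List Char) (n : Nat) (j : Int) (c : Char)
    (h0 : 0 ≤ j) (h : j < (n : Int)) :
    PySem.List.pyGetD (List.take n l) j c = PySem.List.pyGetD l j c := by
  rw [PySem.List.pyGetD_of_nonneg _ _ h0, PySem.List.pyGetD_of_nonneg _ _ h0,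
    List.getD_eq_getElem?_getD, List.getD_eq_getElem?_getD, List.getElem?_take,
    if_pos (show j.toNat < n from by omega)]

theorem rowsB_cell (data : List String) (N : Int) (i j : Int)
    (hi0 : 0 ≤ i) (hiN : i < N) (hj0 : 0 ≤ j) (hjN : j < N) :
    PySem.List.pyGetD (PySem.List.pyGetD (rowsB data N) i []) j ' '
      = PySem.List.pyGetD (rowOf data N i) j ' ' := by
  rw [rowsB_get data N i hi0 hiN, pyGetD_take _ _ _ _ hj0 (by omega)]

theorem gridA_aux (N : Int) (d0 : List (List Char)) (m : Nat) (hm : m ≤ d0.length) :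
    ((List.range m).foldl (fun d (x : Nat) => d.set ((x : Int)).toNat (padA N (PySem.List.pyGetD d (x : Int) []))) d0).length = d0.length ∧
    (∀ j : Nat, ((List.range m).foldl (fun d (x : Nat) => d.set ((x : Int)).toNat (padA N (PySem.List.pyGetD d (x : Int) []))) d0)[j]? =
      if j < m then some (padA N (d0.getD j [])) else d0[j]?) := by
  induction m with
  | zero => simp
  | succ m ih =>
    obtain ⟨ihl, ihg⟩ := ih (by omega)
    rw [List.range_succ, List.foldl_append, List.foldl_cons, List.foldl_nil]
    set r := (List.range m).foldl (fun d (x : Nat) => d.set ((x : Int)).toNat (padA N (PySem.List.pyGetD d (x : Int) []))) d0 with hr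
    have hrm : r[m]? = d0[m]? := by rw [ihg m]; simp
    have hget : PySem.List.pyGetD r ((m : Int)) [] = d0.getD m [] := by
      rw [PySem.List.pyGetD_natCast, List.getD_eq_getElem?_getD, hrm, List.getD_eq_getElem?_getD]
    have hmt : ((m : Int)).toNat = m := by omega
    constructor
    · rw [List.length_set, ihl]
    · intro j
      rw [hget, hmt, List.getElem?_set]
      by_cases hj : j = m
      · subst hj
        simp [ihl, show j < d0.length from by omega, show j < j + 1 from by omega]
      · rw [if_neg (fun h => hj h.symm), ihg j]
        by_cases h2 : j < m
        · rw [if_pos h2, if_pos (by omega)]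
        · rw [if_neg h2, if_neg (by omega)]

theorem gridA_get (data : List String) (N : Int) (i : Int) (h0 : 0 ≤ i) (h1 : i < N)
    (hlen : N ≤ (data.length : Int)) :
    PySem.List.pyGetD (gridA data N) i [] = rowOf data N i := by
  unfold gridA
  have hN0 : 0 ≤ N := by omega
  rw [show N = ((N.toNat : Int)) from by omega, PySem.List.pyRange_zero_natCast, List.foldl_map]
  have hmlen : N.toNat ≤ (data.map String.toList).length := by simp; omega
  obtain ⟨_, hg⟩ := gridA_aux ((N.toNat : Int)) (data.map String.toList) N.toNat hmlen
  rw [PySem.List.pyGetD_of_nonneg _ _ h0, List.getD_eq_getElem?_getD, hg i.toNat,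
    if_pos (show i.toNat < N.toNat from by omega)]
  unfold rowOf
  rw [PySem.List.pyGetD_of_nonneg _ _ h0, List.getD_eq_getElem?_getD]
  simp

theorem winA_eq_iff (g : List (List Char)) (K : Int) (f : Int → Int × Int) (c : Char) :
    (winA g K f == List.replicate K.toNat c) = true ↔
      ∀ t ∈ PySem.List.pyRange 0 K,
        PySem.List.pyGetD (PySem.List.pyGetD g (f t).1 []) (f t).2 ' ' = c := by
  rw [beq_iff_eq]
  unfold winA
  rw [PySem.List.foldl_append_singleton_eq_map, List.nil_append, List.eq_replicate_iff]
  have hlen : (PySem.List.pyRange 0 K).length = K.toNat := by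
    rw [PySem.List.pyRange_one]; simp
  constructor
  · intro ⟨_, h⟩ t ht
    exact h _ (List.mem_map_of_mem ht)
  · intro h
    refine ⟨by simp [hlen], ?_⟩
    intro b hb
    obtain ⟨t, ht, rfl⟩ := List.mem_map.mp hb
    exact h t ht

theorem replicate_eq_take_iff (k : Nat) (c : Char) (u : List Char) :
    List.replicate k c = List.take k u ↔ ∀ t < k, u[t]? = some c := by
  constructor
  · intro h t ht
    have : (List.take k u)[t]? = (List.replicate k c)[t]? := by rw [h]
    rw [List.getElem?_take, if_pos ht, List.getElem?_replicate, if_pos ht] at this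
    exact this
  · intro h
    apply List.ext_getElem?
    intro i
    rw [List.getElem?_take, List.getElem?_replicate]
    by_cases hi : i < k
    · rw [if_pos hi, if_pos hi, h i hi]
    · rw [if_neg hi, if_neg hi]

theorem isIn_replicate_iff (k : Nat) (c : Char) (l : List Char) :
    PySem.Chars.isIn (List.replicate k c) l = true ↔ ∃ m : Nat, ∀ t < k, l[m + t]? = some c := by
  rw [← PySem.Chars.exists_prefix_drop_iff_isIn]
  constructor
  · intro ⟨j, hj⟩
    refine ⟨j, fun t ht => ?_⟩
    rw [List.prefix_iff_eq_take, List.length_replicate] at hj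
    have := (replicate_eq_take_iff k c (List.drop j l)).mp hj t ht
    rwa [List.getElem?_drop] at this
  · intro ⟨m, hm⟩
    refine ⟨m, ?_⟩
    rw [List.prefix_iff_eq_take, List.length_replicate, replicate_eq_take_iff]
    intro t ht
    rw [List.getElem?_drop]
    exact hm t ht

theorem mapline_getElem {β : Type} (lo hi : Int) (f : Int → β) (m : Nat) :
    ((PySem.List.pyRange lo hi).map f)[m]? = if (m : Int) < hi - lo then some (f (lo + (m : Int))) else none := by
  rw [PySem.List.pyRange_one, List.map_map, List.getElem?_map]
  by_cases hm : m < (hi - lo).toNat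
  · rw [List.getElem?_range hm, if_pos (by omega)]
    rfl
  · rw [List.getElem?_eq_none (by simp; omega), if_neg (by omega)]
    rfl

theorem cell_iff (l : List Char) (m : Nat) (hm : m < l.length) (ch : Char) :
    l[m]? = some ch ↔ PySem.List.pyGetD l (m : Int) ' ' = ch := by
  rw [List.getElem?_eq_getElem hm, PySem.List.pyGetD_natCast, List.getD_eq_getElem?_getD,
    List.getElem?_eq_getElem hm, Option.getD_some]
  exact ⟨fun h => by injection h, fun h => by rw [h]⟩

theorem E1 (data : List String) (N K : Int) (hN : 1 ≤ N) (hK : 1 ≤ K)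
    (hlen : N ≤ (data.length : Int)) (c : Char) :
    ((PySem.List.pyRange 0 N).any (fun i => (PySem.List.pyRange 0 (N - K + 1)).any (fun j =>
        winA (gridA data N) K (fun t => (i, j + t)) == List.replicate K.toNat c)))
      = (rowsB data N).any (fun l => PySem.Chars.isIn (List.replicate K.toNat c) l) := by
  apply bool_eq_of_iff
  rw [List.any_eq_true]
  simp only [List.any_eq_true, PySem.List.mem_pyRange_one, winA_eq_iff,
    rowsB_eq_map data N (show (0:Int) ≤ N by omega), List.mem_map]
  constructor
  · rintro ⟨i, ⟨hi0, hiN⟩, j, ⟨⟨hj0, hjN⟩, hw⟩⟩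
    refine ⟨List.take N.toNat (rowOf data N i), ⟨i, ⟨hi0, hiN⟩, rfl⟩, ?_⟩
    rw [isIn_replicate_iff]
    refine ⟨j.toNat, fun t ht => ?_⟩
    rw [List.getElem?_take, if_pos (by omega)]
    apply (cell_iff _ _ (by have := rowOf_len data N i; omega) c).mpr
    have hw' := hw ((t : Int)) ⟨by omega, by omega⟩
    rw [gridA_get data N i hi0 hiN hlen] at hw'
    rwa [show ((j.toNat + t : Nat) : Int) = j + (t : Int) from by omega]
  · rintro ⟨l, ⟨i, ⟨hi0, hiN⟩, rfl⟩, hin⟩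
    rw [isIn_replicate_iff] at hin
    obtain ⟨m, hm⟩ := hin
    have hmlt : m + K.toNat ≤ N.toNat := by
      have h2 := hm (K.toNat - 1) (by omega)
      rw [List.getElem?_take] at h2
      by_cases hcond : m + (K.toNat - 1) < N.toNat
      · omega
      · rw [if_neg hcond] at h2; simp at h2
    refine ⟨i, ⟨hi0, hiN⟩, (m : Int), ⟨⟨by omega, by omega⟩, ?_⟩⟩
    intro t htm
    have ⟨ht0, htK⟩ := htm
    rw [gridA_get data N i hi0 hiN hlen]
    have h3 := hm t.toNat (by omega)
    rw [List.getElem?_take, if_pos (by omega)] at h3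
    have := (cell_iff _ _ (by have := rowOf_len data N i; omega) c).mp h3
    rwa [show ((m + t.toNat : Nat) : Int) = (m : Int) + t from by omega] at this

theorem mapline_some {β : Type} (lo hi : Int) (f : Int → β) (m : Nat) (y : β) :
    ((PySem.List.pyRange lo hi).map f)[m]? = some y ↔ ((m : Int) < hi - lo ∧ f (lo + (m : Int)) = y) := by
  rw [mapline_getElem]
  by_cases h : (m : Int) < hi - lo
  · rw [if_pos h]
    constructor
    · intro he; exact ⟨h, by injection he⟩
    · intro he; rw [he.2]
  · rw [if_neg h]
    constructor
    · intro he; cases he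
    · intro he; exact absurd he.1 h

theorem E2 (data : List String) (N K : Int) (hN : 1 ≤ N) (hK : 1 ≤ K)
    (hlen : N ≤ (data.length : Int)) (c : Char) :
    ((PySem.List.pyRange 0 (N - K + 1)).any (fun i => (PySem.List.pyRange 0 N).any (fun j =>
        winA (gridA data N) K (fun t => (i + t, j)) == List.replicate K.toNat c)))
      = ((PySem.List.pyRange 0 N).map (fun j => (PySem.List.pyRange 0 N).map (fun i =>
          PySem.List.pyGetD (PySem.List.pyGetD (rowsB data N) i []) j ' '))).any
          (fun l => PySem.Chars.isIn (List.replicate K.toNat c) l) := by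
  apply bool_eq_of_iff
  simp only [List.any_eq_true, List.mem_map, PySem.List.mem_pyRange_one, winA_eq_iff]
  constructor
  · rintro ⟨i, ⟨hi0, hiN⟩, j, ⟨⟨hj0, hjN⟩, hw⟩⟩
    refine ⟨_, ⟨j, ⟨hj0, hjN⟩, rfl⟩, ?_⟩
    rw [isIn_replicate_iff]
    refine ⟨i.toNat, fun t ht => ?_⟩
    rw [mapline_some]
    refine ⟨by omega, ?_⟩
    rw [rowsB_cell data N _ _ (by omega) (by omega) hj0 hjN]
    rw [show PySem.List.pyGetD (rowOf data N ((0:Int) + ((i.toNat + t : Nat) : Int))) j ' '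
        = PySem.List.pyGetD (rowOf data N (i + (t : Int))) j ' ' from by
      congr 2; omega]
    have hw' := hw ((t : Int)) ⟨by omega, by omega⟩
    rwa [gridA_get data N _ (by omega) (by omega) hlen] at hw'
  · rintro ⟨l, ⟨j, ⟨hj0, hjN⟩, rfl⟩, hin⟩
    rw [isIn_replicate_iff] at hin
    obtain ⟨m, hm⟩ := hin
    have hbound : (m : Int) + K ≤ N := by
      have h2 := hm (K.toNat - 1) (by omega)
      rw [mapline_some] at h2
      obtain ⟨hb2, _⟩ := h2
      omega
    refine ⟨(m : Int), ⟨by omega, by omega⟩, j, ⟨⟨hj0, hjN⟩, ?_⟩⟩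
    intro t ht
    obtain ⟨ht0, htK⟩ := ht
    rw [gridA_get data N _ (by omega) (by omega) hlen]
    have h3 := hm t.toNat (by omega)
    rw [mapline_some] at h3
    obtain ⟨hb, hv⟩ := h3
    rw [rowsB_cell data N _ _ (by omega) (by omega) hj0 hjN] at hv
    rwa [show ((0 : Int) + ((m + t.toNat : Nat) : Int)) = (m : Int) + t from by omega] at hv

theorem E4 (data : List String) (N K : Int) (hN : 1 ≤ N) (hK : 1 ≤ K)
    (hlen : N ≤ (data.length : Int)) (c : Char) :
    ((PySem.List.pyRange 0 (N - K + 1)).any (fun i => (PySem.List.pyRange 0 (N - K + 1)).any (fun j =>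
        winA (gridA data N) K (fun t => (i + t, j + t)) == List.replicate K.toNat c)))
      = ((PySem.List.pyRange (-(N - 1)) N).map (fun d =>
          (PySem.List.pyRange (max 0 (-d)) (min N (N - d))).map (fun i =>
            PySem.List.pyGetD (PySem.List.pyGetD (rowsB data N) i []) (i + d) ' '))).any
          (fun l => PySem.Chars.isIn (List.replicate K.toNat c) l) := by
  apply bool_eq_of_iff
  simp only [List.any_eq_true, List.mem_map, PySem.List.mem_pyRange_one, winA_eq_iff]
  constructor
  · rintro ⟨i, ⟨hi0, hiN⟩, j, ⟨⟨hj0, hjN⟩, hw⟩⟩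
    refine ⟨_, ⟨j - i, ⟨by omega, by omega⟩, rfl⟩, ?_⟩
    rw [isIn_replicate_iff]
    refine ⟨(min i j).toNat, fun t ht => ?_⟩
    rw [mapline_some]
    refine ⟨by omega, ?_⟩
    have e1 : (max 0 (-(j - i)) + (((min i j).toNat + t : Nat) : Int)) = i + (t : Int) := by omega
    rw [e1, rowsB_cell data N _ _ (by omega) (by omega) (by omega) (by omega)]
    have hw' := hw ((t : Int)) ⟨by omega, by omega⟩
    rw [gridA_get data N _ (by omega) (by omega) hlen] at hw'
    have e2 : i + (t : Int) + (j - i) = j + (t : Int) := by omega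
    rwa [e2]
  · rintro ⟨l, ⟨d, ⟨hd0, hdN⟩, rfl⟩, hin⟩
    rw [isIn_replicate_iff] at hin
    obtain ⟨m, hm⟩ := hin
    have hbound : max 0 (-d) + (m : Int) + K ≤ min N (N - d) := by
      have h2 := hm (K.toNat - 1) (by omega)
      rw [mapline_some] at h2
      obtain ⟨hb2, _⟩ := h2
      omega
    refine ⟨max 0 (-d) + (m : Int), ⟨by omega, by omega⟩,
      max 0 (-d) + (m : Int) + d, ⟨⟨by omega, by omega⟩, ?_⟩⟩
    intro t ht
    obtain ⟨ht0, htK⟩ := ht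
    rw [gridA_get data N _ (by omega) (by omega) hlen]
    have h3 := hm t.toNat (by omega)
    rw [mapline_some] at h3
    obtain ⟨hb, hv⟩ := h3
    have e1 : (max 0 (-d) + ((m + t.toNat : Nat) : Int)) = max 0 (-d) + (m : Int) + t := by omega
    rw [e1, rowsB_cell data N _ _ (by omega) (by omega) (by omega) (by omega)] at hv
    have e2 : max 0 (-d) + (m : Int) + t + d = max 0 (-d) + (m : Int) + d + t := by omega
    rwa [e2] at hv

theorem E3 (data : List String) (N K : Int) (hN : 1 ≤ N) (hK : 1 ≤ K)
    (hlen : N ≤ (data.length : Int)) (c : Char) :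
    ((PySem.List.pyRange (K - 1) N).any (fun i => (PySem.List.pyRange 0 (N - K + 1)).any (fun j =>
        winA (gridA data N) K (fun t => (i - t, j + t)) == List.replicate K.toNat c)))
      = ((PySem.List.pyRange 0 (2 * N - 1)).map (fun t =>
          (PySem.List.pyRange (max 0 (t - N + 1)) (min t (N - 1) + 1)).map (fun r =>
            PySem.List.pyGetD (PySem.List.pyGetD (rowsB data N) r []) (t - r) ' '))).any
          (fun l => PySem.Chars.isIn (List.replicate K.toNat c) l) := by
  apply bool_eq_of_iff
  simp only [List.any_eq_true, List.mem_map, PySem.List.mem_pyRange_one, winA_eq_iff]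
  constructor
  · rintro ⟨i, ⟨hiK, hiN⟩, j, ⟨⟨hj0, hjN⟩, hw⟩⟩
    refine ⟨_, ⟨i + j, ⟨by omega, by omega⟩, rfl⟩, ?_⟩
    rw [isIn_replicate_iff]
    refine ⟨(i - K + 1 - max 0 (i + j - N + 1)).toNat, fun t ht => ?_⟩
    rw [mapline_some]
    refine ⟨by omega, ?_⟩
    have e1 : (max 0 (i + j - N + 1) + (((i - K + 1 - max 0 (i + j - N + 1)).toNat + t : Nat) : Int))
        = i - (K - 1 - (t : Int)) := by omega
    rw [e1, rowsB_cell data N _ _ (by omega) (by omega) (by omega) (by omega)]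
    have hw' := hw (K - 1 - (t : Int)) ⟨by omega, by omega⟩
    rw [gridA_get data N _ (by omega) (by omega) hlen] at hw'
    have e2 : i + j - (i - (K - 1 - (t : Int))) = j + (K - 1 - (t : Int)) := by omega
    rwa [e2]
  · rintro ⟨l, ⟨s, ⟨hs0, hsN⟩, rfl⟩, hin⟩
    rw [isIn_replicate_iff] at hin
    obtain ⟨m, hm⟩ := hin
    have hbound : max 0 (s - N + 1) + (m : Int) + K ≤ min s (N - 1) + 1 := by
      have h2 := hm (K.toNat - 1) (by omega)
      rw [mapline_some] at h2
      obtain ⟨hb2, _⟩ := h2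
      omega
    refine ⟨max 0 (s - N + 1) + (m : Int) + K - 1, ⟨by omega, by omega⟩,
      s - (max 0 (s - N + 1) + (m : Int) + K - 1), ⟨⟨by omega, by omega⟩, ?_⟩⟩
    intro t ht
    obtain ⟨ht0, htK⟩ := ht
    rw [gridA_get data N _ (by omega) (by omega) hlen]
    have h3 := hm (K - 1 - t).toNat (by omega)
    rw [mapline_some] at h3
    obtain ⟨hb, hv⟩ := h3
    have e1 : (max 0 (s - N + 1) + ((m + (K - 1 - t).toNat : Nat) : Int))
        = max 0 (s - N + 1) + (m : Int) + K - 1 - t := by omega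
    rw [e1, rowsB_cell data N _ _ (by omega) (by omega) (by omega) (by omega)] at hv
    have e2 : s - (max 0 (s - N + 1) + (m : Int) + K - 1 - t)
        = s - (max 0 (s - N + 1) + (m : Int) + K - 1) + t := by omega
    rwa [e2] at hv

theorem solve_main (data : List String) (N K : Int) (hN : 1 ≤ N) (hK : 1 ≤ K)
    (hlen : N ≤ (data.length : Int)) :
    solve data N K = solve_alt data N K := by
  by_cases hKN : N < K
  · have h2 : PySem.List.pyRange 0 (N - K + 1) = [] := pyRange_nil (by omega)
    have hA : solve data N K = "Neither" := by
      unfold solve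
      simp only [loopA_id _ _ _ _ _ _ _ _ h2, loopA_nil _ _ _ _ _ _ _ _ h2]
      rfl
    rw [hA]
    unfold solve_alt
    rw [if_pos hKN]
  unfold solve solve_alt linesB
  rw [if_neg hKN]
  simp only [loopA_eq_any, Bool.false_or]
  simp only [List.any_append]
  have hsw : ∀ a b c d : Bool, (((a || b) || c) || d) = (((a || b) || d) || c) := by decide
  have key : ∀ (r1 b1 r2 b2 : Bool), r1 = r2 → b1 = b2 →
      ((if r1 && b1 then "Both" else if r1 then "Red" else if b1 then "Blue" else "Neither") =
       (if r2 && b2 then "Both" else if r2 then "Red" else if b2 then "Blue" else "Neither")) := by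
    intro r1 b1 r2 b2 h1 h2; rw [h1, h2]
  apply key
  · rw [E1 data N K hN hK hlen 'R', E2 data N K hN hK hlen 'R',
      E3 data N K hN hK hlen 'R', E4 data N K hN hK hlen 'R']
    exact hsw _ _ _ _
  · rw [E1 data N K hN hK hlen 'B', E2 data N K hN hK hlen 'B',
      E3 data N K hN hK hlen 'B', E4 data N K hN hK hlen 'B']
    exact hsw _ _ _ _

-- ===== VERDICT (by name: the statement is the Claim_ definition above) =====
theorem solve_spec : Claim_unchanged_solve := by
  intro data N K _hD hpre hnd
  unfold Pre_solve at hpre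
  unfold D_solve at hnd
  by_cases hN : 1 ≤ N
  · by_cases hK : 1 ≤ K
    · exact solve_main data N K hN hK hpre
    · exact ((solve_deg_both data N K hN (by omega) hpre).1).trans
        ((solve_deg_both data N K hN (by omega) hpre).2).symm
  · by_cases hK : K ≤ N
    · exact absurd ⟨by omega, hK⟩ hnd
    · exact ((solve_deg_neither data N K (by omega) (by omega)).1).trans
        ((solve_deg_neither data N K (by omega) (by omega)).2).symm

theorem solve_changed : Claim_changed_solve := by
  unfold Claim_changed_solve; decide

theorem solve_tight : Claim_exact_solve := by
  intro data N K _hD _hpre hd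
  obtain ⟨h1, h2⟩ := hd
  have := solve_deg_D data N K h1 h2
  rw [this.1, this.2]
  decide
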